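-- pv_equiv track=rewrite | github.com/GuillaumeTroesch/DAG_CSR | scripts/repartition.py | mapsDesEchanges
-- ===== SOURCE A (Python) =====
-- def mapsDesEchanges(repartition):
-- 	res = []
-- 	nbProc = len(repartition)
-- 	aretesExtDemandeesParProc = [] # [[liste_Aretes_Ext_A_Recevoir_par_proc_0], ...]
-- 	noeudsExtDemandeesParProc = [] # [[liste_Noeuds_Ext_A_Recevoir_par_proc_0], ...]
-- 	for (_, aretesExtDemandees, _, noeudsExtDemandes) in repartition:
-- 		aretesExtDemandeesParProc.append(aretesExtDemandees)
-- 		noeudsExtDemandeesParProc.append(noeudsExtDemandes)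
--
-- 	#Creation des dicts des noeuds et aretes a recevoir
-- 	listMapAretesARecevoir = [] #Pour chaque proc, dict des aretes a recevoir
-- 	listMapNoeudsARecevoir = []
-- 	for numProc in range(nbProc):
-- 		mapAretes = {}
-- 		mapNoeuds = {}
-- 		# Pour chaque arete ext demandee, on va chercher quel autre processeur traite cette arete
-- 		# et l'ajouter au dico des aretes_a_recevoir
-- 		for areteDemandee in aretesExtDemandeesParProc[numProc]:
-- 			for numProc2 in range(nbProc):
-- 				if (numProc2 != numProc):
-- 					for areteTraitee in repartition[numProc2][0]:
-- 						if (areteDemandee==areteTraitee): #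
-- 							if (numProc2 in mapAretes):
-- 								mapAretes[numProc2].append(areteDemandee)
-- 							else:
-- 								mapAretes[numProc2] = [areteDemandee]
-- 							break
-- 							break
-- 		# Pour chaque noeud ext demande, on va chercher quel autre processeur traite ce noeud
-- 		# et l'ajouter au dico des noeud_a_recevoir
-- 		for noeudDemande in noeudsExtDemandeesParProc[numProc]:
-- 			for numProc2 in range(nbProc):
-- 				if (numProc2 != numProc):
-- 					for noeudTraite in repartition[numProc2][2]:
-- 						if (noeudDemande==noeudTraite):
-- 							if (numProc2 in mapNoeuds):
-- 								mapNoeuds[numProc2].append(noeudDemande)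
-- 							else:
-- 								mapNoeuds[numProc2] = [noeudDemande]
-- 							break
-- 							break
-- 		listMapAretesARecevoir.append(mapAretes)
-- 		listMapNoeudsARecevoir.append(mapNoeuds)
--
-- 	#Creation des dicts des noeuds et aretes a envoyer
-- 	listMapAretesAEnvoyer = [] #Pour chaque proc, dict des aretes a envoyer
-- 	listMapNoeudsAEnvoyer = []
-- 	for numProc in range(nbProc):
-- 		mapAretes = {}
-- 		mapNoeuds = {}
-- 		# On considère chaque proc (numProc)
-- 		# On parcours les aretes que les autres procs (numProc2) doivent recevoir et on regarde qui doit recevoir du proc considéré (numProc3==numProc)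
-- 		# et on l'ajoute au dico des aretes à envoyer
-- 		for numProc2 in range(nbProc):
-- 			if (numProc != numProc2):
-- 				for (numProc3, listeAretes) in listMapAretesARecevoir[numProc2].items():
-- 					if (numProc3==numProc):
-- 						if (numProc2 in mapAretes):
-- 							mapAretes[numProc2] += listeAretes
-- 						else:
-- 							mapAretes[numProc2] = listeAretes
-- 						break
-- 		# On considère chaque proc (numProc)
-- 		# On parcours les noeuds que les autres procs (numProc2) doivent recevoir et on regarde qui doit recevoir du proc considéré (numProc3==numProc)
-- 		# et on l'ajoute au dico des noeuds à envoyer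
-- 		for numProc2 in range(nbProc):
-- 			if (numProc != numProc2):
-- 				for (numProc3, listeNoeuds) in listMapNoeudsARecevoir[numProc2].items():
-- 					if (numProc3==numProc):
-- 						if (numProc2 in mapNoeuds):
-- 							mapNoeuds[numProc2] += listeNoeuds
-- 						else:
-- 							mapNoeuds[numProc2] = listeNoeuds
-- 						break
-- 		listMapAretesAEnvoyer.append(mapAretes)
-- 		listMapNoeudsAEnvoyer.append(mapNoeuds)
--
-- 	for numProc in range(nbProc):
-- 		res.append((repartition[numProc][0], listMapAretesARecevoir[numProc], listMapAretesAEnvoyer[numProc], repartition[numProc][2], listMapNoeudsARecevoir[numProc], listMapNoeudsAEnvoyer[numProc]))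
-- 	return res
-- ===== SOURCE B (Python) =====
-- def mapsDesEchanges(repartition):
-- 	n = len(repartition)
--
-- 	def exchange(owned_idx, demand_idx):
-- 		# Inverted ownership index: element -> ascending list of procs owning it
-- 		# (deduplicated per proc, so a proc appears once even if its owned list repeats the element).
-- 		owners = {}
-- 		for j, r in enumerate(repartition):
-- 			for e in dict.fromkeys(r[owned_idx]):
-- 				owners.setdefault(e, []).append(j)
-- 		# Single pass: build each receive map by direct index lookups and scatter it
-- 		# into the sender's map in the same iteration.
-- 		recv = []
-- 		send = [{} for _ in range(n)]
-- 		for i, r in enumerate(repartition):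
-- 			m = {}
-- 			for e in r[demand_idx]:
-- 				for j in owners.get(e, ()):
-- 					if j != i:
-- 						m.setdefault(j, []).append(e)
-- 			recv.append(m)
-- 			for j, lst in m.items():
-- 				send[j][i] = lst
-- 		return recv, send
--
-- 	recvE, sendE = exchange(0, 1)
-- 	recvN, sendN = exchange(2, 3)
-- 	return [(repartition[i][0], recvE[i], sendE[i], repartition[i][2], recvN[i], sendN[i])
-- 			for i in range(n)]
-- ===== Notes on version B (the rewrite author's own statement) =====
-- stated objective: faster
-- what changed: A runs three staged passes (per proc, per demand, linearly scan every other proc's owned list to build receive dicts, then a second full pass rescanning all receive dicts' items to build send dicts); B builds an inverted ownership index element->owning-procs once, then in a single loop per proc builds its receive map by direct index lookups and immediately scatters its rows into the senders' maps, so neither the ownership scans nor the send rescanning pass exist.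
import Mathlib
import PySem

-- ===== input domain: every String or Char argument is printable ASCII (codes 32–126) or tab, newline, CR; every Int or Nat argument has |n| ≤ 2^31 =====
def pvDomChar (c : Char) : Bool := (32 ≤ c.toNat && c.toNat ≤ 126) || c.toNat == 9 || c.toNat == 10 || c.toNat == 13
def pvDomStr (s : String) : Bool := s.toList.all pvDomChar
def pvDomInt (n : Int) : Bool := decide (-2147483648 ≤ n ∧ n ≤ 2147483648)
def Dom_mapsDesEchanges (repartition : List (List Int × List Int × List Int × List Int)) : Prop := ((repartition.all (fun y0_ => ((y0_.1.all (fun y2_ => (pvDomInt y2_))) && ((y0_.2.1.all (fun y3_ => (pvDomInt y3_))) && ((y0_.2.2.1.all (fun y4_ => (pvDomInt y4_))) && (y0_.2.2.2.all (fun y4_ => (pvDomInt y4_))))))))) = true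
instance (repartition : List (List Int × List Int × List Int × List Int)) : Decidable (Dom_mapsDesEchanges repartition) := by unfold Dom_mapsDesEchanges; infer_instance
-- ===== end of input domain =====

-- B replaces A's three staged passes of nested linear scans by an inverted ownership index
-- (element -> owning procs) built once, and a single loop that builds each receive map by
-- direct index lookups and scatters its rows into the senders' maps in the same iteration;
-- objective: faster (the per-demand scans over every other proc's owned list disappear).

-- ===== PORT A =====
def pvAddRecv (j : Int) (v : List Int) (d : PySem.Dict Int (List Int)) : PySem.Dict Int (List Int) :=
  if d.contains j then d.modify j [] (· ++ v) else d.insert j v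

def pvScanA (e : Int) (j : Int) (owned : List Int) (d : PySem.Dict Int (List Int)) : PySem.Dict Int (List Int) :=
  match owned with
  | [] => d
  | t :: rest => if e == t then pvAddRecv j [e] d else pvScanA e j rest d

def pvRecvA (repartition : List (List Int × List Int × List Int × List Int))
    (sel : (List Int × List Int × List Int × List Int) → List Int)
    (i : Int) (demanded : List Int) : PySem.Dict Int (List Int) :=
  demanded.foldl (fun d e =>
      (PySem.List.pyRange 0 (repartition.length : Int) 1).foldl (fun d j =>
        if j != i then pvScanA e j (sel (PySem.List.pyGetD repartition j ([], [], [], []))) d else d) d)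
    PySem.Dict.empty

def pvScanItemsA (i : Int) (j : Int) (items : List (Int × List Int)) (d : PySem.Dict Int (List Int)) :
    PySem.Dict Int (List Int) :=
  match items with
  | [] => d
  | (k, v) :: rest => if k == i then pvAddRecv j v d else pvScanItemsA i j rest d

def pvSendA (n : Nat) (i : Int) (recvs : List (PySem.Dict Int (List Int))) : PySem.Dict Int (List Int) :=
  (PySem.List.pyRange 0 (n : Int) 1).foldl (fun d j =>
    if i != j then pvScanItemsA i j (PySem.List.pyGetD recvs j PySem.Dict.empty).items d else d)
    PySem.Dict.empty

def mapsDesEchanges (repartition : List (List Int × List Int × List Int × List Int)) : List (List Int × (List (Int × List Int)) × (List (Int × List Int)) × List Int × (List (Int × List Int)) × (List (Int × List Int))) :=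
  let n := repartition.length
  let demandedE := repartition.map (fun r => r.2.1)
  let demandedN := repartition.map (fun r => r.2.2.2)
  let recvE := (PySem.List.pyRange 0 (n : Int) 1).map (fun i =>
    pvRecvA repartition (fun r => r.1) i (PySem.List.pyGetD demandedE i []))
  let recvN := (PySem.List.pyRange 0 (n : Int) 1).map (fun i =>
    pvRecvA repartition (fun r => r.2.2.1) i (PySem.List.pyGetD demandedN i []))
  let sendE := (PySem.List.pyRange 0 (n : Int) 1).map (fun i => pvSendA n i recvE)
  let sendN := (PySem.List.pyRange 0 (n : Int) 1).map (fun i => pvSendA n i recvN)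
  (PySem.List.pyRange 0 (n : Int) 1).map (fun i =>
    ((PySem.List.pyGetD repartition i ([], [], [], [])).1,
     (PySem.List.pyGetD recvE i PySem.Dict.empty).items,
     (PySem.List.pyGetD sendE i PySem.Dict.empty).items,
     (PySem.List.pyGetD repartition i ([], [], [], [])).2.2.1,
     (PySem.List.pyGetD recvN i PySem.Dict.empty).items,
     (PySem.List.pyGetD sendN i PySem.Dict.empty).items))

-- ===== PORT B =====
def pvOwnersB (repartition : List (List Int × List Int × List Int × List Int))
    (owned : (List Int × List Int × List Int × List Int) → List Int) : PySem.Dict Int (List Int) :=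
  (PySem.List.enumerate repartition).foldl (fun d p =>
    (PySem.List.dedup (owned p.2)).foldl (fun d e => d.modify e [] (· ++ [p.1])) d)
    PySem.Dict.empty

def pvRecvB (owners : PySem.Dict Int (List Int)) (i : Int) (demanded : List Int) :
    PySem.Dict Int (List Int) :=
  demanded.foldl (fun m e =>
    (owners.getD e []).foldl (fun m j => if j != i then m.modify j [] (· ++ [e]) else m) m)
    PySem.Dict.empty

-- A's receive dict equals B's receive dict built from the inverted ownership index

def pvSetAt (s : List (PySem.Dict Int (List Int))) (k : Int)
    (f : PySem.Dict Int (List Int) → PySem.Dict Int (List Int)) : List (PySem.Dict Int (List Int)) :=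
  if 0 ≤ k then s.modify k.toNat f else s

def pvPassB (repartition : List (List Int × List Int × List Int × List Int))
    (owners : PySem.Dict Int (List Int))
    (sel : (List Int × List Int × List Int × List Int) → List Int) :
    List (PySem.Dict Int (List Int)) × List (PySem.Dict Int (List Int)) :=
  (PySem.List.enumerate repartition).foldl (fun st p =>
    (st.1 ++ [pvRecvB owners p.1 (sel p.2)],
     (pvRecvB owners p.1 (sel p.2)).items.foldl
       (fun s q => pvSetAt s q.1 (fun d => d.insert p.1 q.2)) st.2))
    ([], List.replicate repartition.length PySem.Dict.empty)

def mapsDesEchanges_alt (repartition : List (List Int × List Int × List Int × List Int)) : List (List Int × (List (Int × List Int)) × (List (Int × List Int)) × List Int × (List (Int × List Int)) × (List (Int × List Int))) :=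
  let n := repartition.length
  let pE := pvPassB repartition (pvOwnersB repartition (fun r => r.1)) (fun r => r.2.1)
  let pN := pvPassB repartition (pvOwnersB repartition (fun r => r.2.2.1)) (fun r => r.2.2.2)
  (PySem.List.pyRange 0 (n : Int) 1).map (fun i =>
    ((PySem.List.pyGetD repartition i ([], [], [], [])).1,
     (PySem.List.pyGetD pE.1 i PySem.Dict.empty).items,
     (PySem.List.pyGetD pE.2 i PySem.Dict.empty).items,
     (PySem.List.pyGetD repartition i ([], [], [], [])).2.2.1,
     (PySem.List.pyGetD pN.1 i PySem.Dict.empty).items,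
     (PySem.List.pyGetD pN.2 i PySem.Dict.empty).items))

-- recvA with the demand list looked up through the mapped list equals pvRecvB, pointwise on the range

-- ===== PRECONDITION & SPEC =====
-- (DecidableEq of the deep result tuple, assembled explicitly: instance search does not reach this depth)
def pvD1 : DecidableEq (List (Int × List Int)) := inferInstance
def pvD2 : DecidableEq (List Int × List (Int × List Int) × List (Int × List Int)) := inferInstance
def pvD3 : DecidableEq (List Int × List (Int × List Int) × List (Int × List Int) × List Int × List (Int × List Int) × List (Int × List Int)) :=
  @instDecidableEqProd _ _ inferInstance (@instDecidableEqProd _ _ pvD1 (@instDecidableEqProd _ _ pvD1 pvD2))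
def pvD4 : DecidableEq (List (List Int × List (Int × List Int) × List (Int × List Int) × List Int × List (Int × List Int) × List (Int × List Int))) :=
  @List.hasDecEq _ pvD3
def Spec_mapsDesEchanges (repartition : List (List Int × List Int × List Int × List Int)) (out : List (List Int × (List (Int × List Int)) × (List (Int × List Int)) × List Int × (List (Int × List Int)) × (List (Int × List Int)))) : Prop := out = mapsDesEchanges_alt repartition
instance (repartition : List (List Int × List Int × List Int × List Int)) (out : List (List Int × (List (Int × List Int)) × (List (Int × List Int)) × List Int × (List (Int × List Int) ) × (List (Int × List Int)))) : Decidable (Spec_mapsDesEchanges repartition out) := by unfold Spec_mapsDesEchanges; exact pvD4 out (mapsDesEchanges_alt repartition)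

-- ===== CLAIM (what is proved, stated in full; the proofs are below) =====
def Claim_equal_mapsDesEchanges : Prop := ∀ (repartition : List (List Int × List Int × List Int × List Int)), Dom_mapsDesEchanges repartition → Spec_mapsDesEchanges repartition (mapsDesEchanges repartition)

-- ===== LEMMAS AND PROOFS =====

theorem pvAddRecv_eq_modify (j : Int) (v : List Int) (d : PySem.Dict Int (List Int)) :
    pvAddRecv j v d = d.modify j [] (· ++ v) := by
  unfold pvAddRecv PySem.Dict.modify
  split
  · rfl
  · rename_i h
    rw [PySem.Dict.getD_of_not_contains _ _ (by simpa using h)];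
    simp

theorem pvScanA_eq (e j : Int) (l : List Int) (d : PySem.Dict Int (List Int)) :
    pvScanA e j l d = if l.contains e then d.modify j [] (· ++ [e]) else d := by
  induction l with
  | nil => simp [pvScanA]
  | cons t rest ih =>
    by_cases h : e = t
    · subst h; simp [pvScanA, pvAddRecv_eq_modify]
    · simp [pvScanA, h, ih]

theorem pvScanItemsA_eq (i j : Int) (K : List Int) (g : Int → List Int) (d : PySem.Dict Int (List Int)) :
    pvScanItemsA i j (K.map (fun c => (c, g c))) d =
      if K.contains i then pvAddRecv j (g i) d else d := by
  induction K with
  | nil => simp [pvScanItemsA]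
  | cons c rest ih =>
    by_cases h : c = i
    · subst h; simp [pvScanItemsA]
    · simp [pvScanItemsA, h, ih, Ne.symm h]

theorem pvFreshFold (l : List Int) (v : Int → List Int) :
    ∀ d : PySem.Dict Int (List Int), l.Nodup → (∀ j ∈ l, d.contains j = false) →
    (l.foldl (fun d j => pvAddRecv j (v j) d) d).items = d.items ++ l.map (fun j => (j, v j)) := by
  induction l with
  | nil => intro d _ _; simp
  | cons j0 rest ih =>
    intro d hl hd
    have hc : d.contains j0 = false := hd j0 (by simp)
    have hstep : pvAddRecv j0 (v j0) d = d.insert j0 (v j0) := by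
      unfold pvAddRecv; rw [hc]; simp
    have hrest : ∀ x ∈ rest, (d.insert j0 (v j0)).contains x = false := by
      intro x hx
      rw [PySem.Dict.contains_insert]
      have hxj : x ≠ j0 := by
        rintro rfl; exact (List.nodup_cons.mp hl).1 hx
      simp [hxj, hd x (by simp [hx])]
    rw [List.foldl_cons, hstep, ih _ (List.Nodup.of_cons hl) hrest,
        PySem.Dict.items_insert_of_not_contains _ _ hc]
    simp

theorem pvFilterBeq (l : List Int) (hl : l.Nodup) (c : Int) :
    l.filter (fun x => x == c) = if c ∈ l then [c] else [] := by
  induction l with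
  | nil => simp
  | cons a l ih =>
    rcases List.nodup_cons.mp hl with ⟨ha, hl'⟩
    by_cases h : a = c
    · subst h
      simp [ih hl', ha]
    · simp [h, ih hl', Ne.symm h]

-- owners pair-list filter, transposed

theorem pvOwnersFilter (e : Int) (js : List Int) (f : Int → List Int) :
    ((js.flatMap (fun j => (PySem.List.dedup (f j)).map (fun x => (x, j)))).filter
        (fun q => q.1 == e)).map (fun q => q.2)
    = js.filter (fun j => (f j).contains e) := by
  induction js with
  | nil => simp
  | cons j js ih =>
    rw [List.flatMap_cons, List.filter_append, List.map_append, ih, List.filter_cons]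
    have h1 : (((PySem.List.dedup (f j)).map (fun x => (x, j))).filter (fun q => q.1 == e)).map
        (fun q : Int × Int => q.2) = if e ∈ f j then [j] else [] := by
      rw [List.filter_map,
          show ((fun q : Int × Int => q.1 == e) ∘ (fun x => (x, j))) = (fun x => x == e) from rfl,
          pvFilterBeq _ (PySem.List.nodup_dedup _) e]
      by_cases h : e ∈ f j <;> simp [h]
    rw [h1]
    by_cases h : e ∈ f j <;> simp [h]

theorem pvOwnersB_getD (repartition : List (List Int × List Int × List Int × List Int))
    (owned : (List Int × List Int × List Int × List Int) → List Int) (e : Int) :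
    (pvOwnersB repartition owned).getD e []
    = (PySem.List.pyRange 0 (repartition.length : Int) 1).filter
        (fun j => (owned (PySem.List.pyGetD repartition j ([], [], [], []))).contains e) := by
  unfold pvOwnersB
  rw [PySem.List.enumerate_eq_map_pyRange repartition ([], [], [], []), PySem.List.len_eq,
      List.foldl_map]
  have hflat : (PySem.List.pyRange 0 (repartition.length : Int) 1).foldl
      (fun d j => (PySem.List.dedup (owned (PySem.List.pyGetD repartition j ([], [], [], [])))).foldl
        (fun d x => d.modify x [] (· ++ [j])) d) PySem.Dict.empty
      = ((PySem.List.pyRange 0 (repartition.length : Int) 1).flatMap (fun j =>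
          (PySem.List.dedup (owned (PySem.List.pyGetD repartition j ([], [], [], [])))).map
            (fun x => (x, j)))).foldl
          (fun d q => d.modify q.1 [] (· ++ [q.2])) PySem.Dict.empty := by
    rw [List.foldl_flatMap]
    apply PySem.List.foldl_congr_mem
    intro acc j _
    rw [List.foldl_map]
  rw [hflat, PySem.Dict.getD_foldl_modify_append, PySem.Dict.getD_empty, List.nil_append,
      pvOwnersFilter]

theorem pvRecvAB (repartition : List (List Int × List Int × List Int × List Int))
    (sel : (List Int × List Int × List Int × List Int) → List Int) (i : Int) (demanded : List Int) :
    pvRecvA repartition sel i demanded = pvRecvB (pvOwnersB repartition sel) i demanded := by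
  unfold pvRecvA pvRecvB
  apply PySem.List.foldl_congr_mem
  intro acc e _
  have h1 : (PySem.List.pyRange 0 (repartition.length : Int) 1).foldl (fun d j =>
        if j != i then pvScanA e j (sel (PySem.List.pyGetD repartition j ([], [], [], []))) d else d) acc
      = (PySem.List.pyRange 0 (repartition.length : Int) 1).foldl (fun d j =>
        if (sel (PySem.List.pyGetD repartition j ([], [], [], []))).contains e then
          (if j != i then d.modify j [] (· ++ [e]) else d) else d) acc := by
    apply PySem.List.foldl_congr_mem
    intro d j _
    rw [pvScanA_eq]
    cases h1 : (j != i) <;> cases h2 : ((sel (PySem.List.pyGetD repartition j ([], [], [], []))).contains e) <;> simp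
  rw [h1, PySem.List.foldl_if_eq_foldl_filter, ← pvOwnersB_getD]

-- canonical pair-fold form of B's receive dict

theorem pvRecvB_pairs (owners : PySem.Dict Int (List Int)) (i : Int) (demanded : List Int) :
    pvRecvB owners i demanded
    = (demanded.flatMap (fun e =>
        ((owners.getD e []).filter (fun j => j != i)).map (fun j => (j, e)))).foldl
      (fun d q => d.modify q.1 [] (· ++ [q.2])) PySem.Dict.empty := by
  unfold pvRecvB
  rw [List.foldl_flatMap]
  apply PySem.List.foldl_congr_mem
  intro acc e _
  rw [List.foldl_map, PySem.List.foldl_if_eq_foldl_filter]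

theorem pvRecvB_keys (owners : PySem.Dict Int (List Int)) (i : Int) (demanded : List Int) :
    (pvRecvB owners i demanded).keys
    = PySem.Set.ofList ((demanded.flatMap (fun e =>
        ((owners.getD e []).filter (fun j => j != i)).map (fun j => (j, e)))).map (fun q => q.1)) := by
  rw [pvRecvB_pairs,
      PySem.Dict.keys_foldl_modify_key _ (fun q : Int × Int => q.1) [] (fun _ q => (· ++ [q.2])),
      PySem.Dict.keys_empty, PySem.Set.update_nil_left]

theorem pvRecvB_keys_nodup (owners : PySem.Dict Int (List Int)) (i : Int) (demanded : List Int) :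
    (pvRecvB owners i demanded).keys.Nodup := by
  rw [pvRecvB_keys]; exact PySem.Set.nodup_ofList _

theorem pvRecvB_keys_ne (owners : PySem.Dict Int (List Int)) (i : Int) (demanded : List Int)
    (k : Int) (hk : k ∈ (pvRecvB owners i demanded).keys) : k ≠ i := by
  rw [pvRecvB_keys, PySem.Set.mem_ofList] at hk
  rcases List.mem_map.mp hk with ⟨q, hq, rfl⟩
  rcases List.mem_flatMap.mp hq with ⟨e, _, hqe⟩
  rcases List.mem_map.mp hqe with ⟨j, hj, rfl⟩
  have := (List.mem_filter.mp hj).2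
  simpa using this

theorem pvSetAt_getElem? (s : List (PySem.Dict Int (List Int))) (k : Int)
    (f : PySem.Dict Int (List Int) → PySem.Dict Int (List Int)) (t : Nat) :
    (pvSetAt s k f)[t]? = if k = (t : Int) then s[t]?.map f else s[t]? := by
  unfold pvSetAt
  by_cases hk : 0 ≤ k
  · rw [if_pos hk, List.getElem?_modify]
    by_cases he : k = (t : Int)
    · have h2 : k.toNat = t := by omega
      cases s[t]? <;> simp [he, h2]
    · have h2 : k.toNat ≠ t := by omega
      cases s[t]? <;> simp [he, h2]
  · have he : k ≠ (t : Int) := by omega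
    rw [if_neg hk, if_neg he]

-- effect of scattering one receive dict (written as a map over its Nodup key list)

theorem pvScatterInner (i : Int) (K : List Int) (g : Int → List Int) (hK : K.Nodup) :
    ∀ (s : List (PySem.Dict Int (List Int))) (t : Nat),
    ((K.map (fun k => (k, g k))).foldl (fun s q => pvSetAt s q.1 (fun d => d.insert i q.2)) s)[t]?
    = if (t : Int) ∈ K then s[t]?.map (fun d => d.insert i (g t)) else s[t]? := by
  induction K with
  | nil => intro s t; simp
  | cons k K ih =>
    intro s t
    rcases List.nodup_cons.mp hK with ⟨hk, hK'⟩
    rw [List.map_cons, List.foldl_cons, ih hK']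
    by_cases he : k = (t : Int)
    · subst he
      simp [hk, pvSetAt_getElem?]
    · by_cases hm : (t : Int) ∈ K <;>
        simp [pvSetAt_getElem?, hm, he, Ne.symm he]

-- effect of the whole scatter loop at one index

theorem pvScatterOuter (L : List (Int × PySem.Dict Int (List Int)))
    (hnd : ∀ p ∈ L, p.2.keys.Nodup) :
    ∀ (s : List (PySem.Dict Int (List Int))) (t : Nat),
    ((L.foldl (fun s p => p.2.items.foldl
        (fun s q => pvSetAt s q.1 (fun d => d.insert p.1 q.2)) s) s))[t]?
    = s[t]?.map (fun d0 => L.foldl (fun d p =>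
        if (t : Int) ∈ p.2.keys then d.insert p.1 (p.2.getD t []) else d) d0) := by
  induction L with
  | nil => intro s t; simp
  | cons p L ih =>
    intro s t
    have hp : p.2.keys.Nodup := hnd p (by simp)
    rw [List.foldl_cons,
        ih (fun q hq => hnd q (by simp [hq])),
        PySem.Dict.items_eq_map_keys p.2 hp [], pvScatterInner p.1 _ _ hp]
    by_cases hm : (t : Int) ∈ p.2.keys
    · simp [hm, Option.map_map, Function.comp_def]
    · simp [hm]

theorem pvPassB_fst (repartition : List (List Int × List Int × List Int × List Int))
    (owners : PySem.Dict Int (List Int))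
    (sel : (List Int × List Int × List Int × List Int) → List Int) :
    (pvPassB repartition owners sel).1
    = (PySem.List.pyRange 0 (repartition.length : Int) 1).map (fun i =>
        pvRecvB owners i (sel (PySem.List.pyGetD repartition i ([], [], [], [])))) := by
  unfold pvPassB
  rw [PySem.List.foldl_prod_mk
        (fun (s1 : List (PySem.Dict Int (List Int)))
             (p : Int × (List Int × List Int × List Int × List Int)) =>
          s1 ++ [pvRecvB owners p.1 (sel p.2)])
        (fun s2 p => (pvRecvB owners p.1 (sel p.2)).items.foldl
          (fun s q => pvSetAt s q.1 (fun d => d.insert p.1 q.2)) s2)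
        (PySem.List.enumerate repartition) [] (List.replicate repartition.length PySem.Dict.empty)]
  rw [PySem.List.foldl_append_singleton_eq_map, List.nil_append,
      PySem.List.enumerate_eq_map_pyRange repartition ([], [], [], []), PySem.List.len_eq,
      List.map_map]
  rfl

theorem pvPassB_snd_getElem (repartition : List (List Int × List Int × List Int × List Int))
    (owners : PySem.Dict Int (List Int))
    (sel : (List Int × List Int × List Int × List Int) → List Int)
    (t : Nat) (ht : t < repartition.length) :
    ((pvPassB repartition owners sel).2)[t]?
    = some ((PySem.List.pyRange 0 (repartition.length : Int) 1).foldl (fun d j =>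
        if (t : Int) ∈ (pvRecvB owners j (sel (PySem.List.pyGetD repartition j ([], [], [], [])))).keys
        then d.insert j ((pvRecvB owners j (sel (PySem.List.pyGetD repartition j ([], [], [], [])))).getD t [])
        else d) PySem.Dict.empty) := by
  unfold pvPassB
  rw [PySem.List.foldl_prod_mk
        (fun (s1 : List (PySem.Dict Int (List Int)))
             (p : Int × (List Int × List Int × List Int × List Int)) =>
          s1 ++ [pvRecvB owners p.1 (sel p.2)])
        (fun s2 p => (pvRecvB owners p.1 (sel p.2)).items.foldl
          (fun s q => pvSetAt s q.1 (fun d => d.insert p.1 q.2)) s2)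
        (PySem.List.enumerate repartition) [] (List.replicate repartition.length PySem.Dict.empty)]
  rw [← List.foldl_map
        (f := fun p : Int × (List Int × List Int × List Int × List Int) =>
          (p.1, pvRecvB owners p.1 (sel p.2)))
        (g := fun s (q : Int × PySem.Dict Int (List Int)) => q.2.items.foldl
          (fun s q' => pvSetAt s q'.1 (fun d => d.insert q.1 q'.2)) s),
      pvScatterOuter _ (by
        intro p hp
        rcases List.mem_map.mp hp with ⟨q, _, rfl⟩
        exact pvRecvB_keys_nodup _ _ _)]
  rw [List.getElem?_replicate, if_pos ht]
  rw [Option.map_some]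
  congr 1
  rw [List.foldl_map, PySem.List.enumerate_eq_map_pyRange repartition ([], [], [], []),
      PySem.List.len_eq, List.foldl_map]

theorem pvSendA_items (n : Nat) (i : Int) (R : Int → PySem.Dict Int (List Int))
    (hnd : ∀ j, (R j).keys.Nodup)
    (hne : ∀ j, ∀ k ∈ (R j).keys, k ≠ j) :
    (pvSendA n i ((PySem.List.pyRange 0 (n : Int) 1).map R)).items
    = ((PySem.List.pyRange 0 (n : Int) 1).filter (fun j => (R j).keys.contains i)).map
        (fun j => (j, (R j).getD i [])) := by
  unfold pvSendA
  have h1 : (PySem.List.pyRange 0 (n : Int) 1).foldl (fun d j =>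
      if i != j then pvScanItemsA i j
        (PySem.List.pyGetD ((PySem.List.pyRange 0 (n : Int) 1).map R) j PySem.Dict.empty).items d
      else d) PySem.Dict.empty
      = (PySem.List.pyRange 0 (n : Int) 1).foldl (fun d j =>
        if (R j).keys.contains i then pvAddRecv j ((R j).getD i []) d else d) PySem.Dict.empty := by
    apply PySem.List.foldl_congr_mem
    intro d j hj
    rcases PySem.List.mem_pyRange_one.mp hj with ⟨h0, h1⟩
    rw [PySem.List.pyGetD_map_pyRange_of_nonneg R _ j _ h0 h1,
        PySem.Dict.items_eq_map_keys (R j) (hnd j) [], pvScanItemsA_eq]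
    by_cases hc : (R j).keys.contains i
    · have hij : i ≠ j := by
        have : i ∈ (R j).keys := by simpa using hc
        exact hne j i this
      simp [hc, hij]
    · have : ((R j).keys.contains i) = false := by simpa using hc
      rw [this]
      by_cases hij : (i != j) = true <;> simp [hij]
  rw [h1, PySem.List.foldl_if_eq_foldl_filter, pvFreshFold _ _ _
        (List.Nodup.filter _ (PySem.List.nodup_pyRange_one 0 _))
        (fun j _ => PySem.Dict.contains_empty _)]
  simp [PySem.Dict.empty]

theorem pvGetD_of_some {α : Type} (xs : List α) (i : Int) (d v : α)
    (h0 : 0 ≤ i) (hv : xs[i.toNat]? = some v) : PySem.List.pyGetD xs i d = v := by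
  rw [PySem.List.pyGetD, PySem.List.pyGet?_of_nonneg xs h0, hv]; rfl

theorem pvPassB_snd_items (repartition : List (List Int × List Int × List Int × List Int))
    (owners : PySem.Dict Int (List Int))
    (sel : (List Int × List Int × List Int × List Int) → List Int)
    (i : Int) (h0 : 0 ≤ i) (h1 : i < (repartition.length : Int)) :
    (PySem.List.pyGetD (pvPassB repartition owners sel).2 i PySem.Dict.empty).items
    = ((PySem.List.pyRange 0 (repartition.length : Int) 1).filter (fun j =>
        (pvRecvB owners j (sel (PySem.List.pyGetD repartition j ([], [], [], [])))).keys.contains i)).map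
        (fun j => (j, (pvRecvB owners j (sel (PySem.List.pyGetD repartition j ([], [], [], [])))).getD i [])) := by
  have ht : i.toNat < repartition.length := by omega
  have hg := pvPassB_snd_getElem repartition owners sel i.toNat ht
  rw [Int.toNat_of_nonneg h0] at hg
  have hsplit := PySem.List.foldl_ite_eq_foldl_filter
        (fun j => i ∈ (pvRecvB owners j (sel (PySem.List.pyGetD repartition j ([], [], [], [])))).keys)
        (fun (d : PySem.Dict Int (List Int)) j =>
          d.insert j ((pvRecvB owners j (sel (PySem.List.pyGetD repartition j ([], [], [], [])))).getD i []))
        (PySem.List.pyRange 0 (repartition.length : Int) 1) PySem.Dict.empty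
  rw [pvGetD_of_some _ _ _ _ h0 hg, hsplit,
      PySem.Dict.items_foldl_insert_fresh _ (fun j : Int => j)
        (fun j => (pvRecvB owners j (sel (PySem.List.pyGetD repartition j ([], [], [], [])))).getD i [])
        PySem.Dict.empty (fun a _ => PySem.Dict.contains_empty _)
        (by simpa using List.Nodup.filter _ (PySem.List.nodup_pyRange_one 0 _))]
  rw [show (PySem.Dict.empty : PySem.Dict Int (List Int)).items = [] from rfl, List.nil_append]
  congr 1
  apply List.filter_congr
  intro j _
  rw [Bool.eq_iff_iff, List.contains_iff_mem]
  simp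

theorem pvRecvList_eq (repartition : List (List Int × List Int × List Int × List Int))
    (sel dsel : (List Int × List Int × List Int × List Int) → List Int)
    (i : Int) (h0 : 0 ≤ i) (h1 : i < (repartition.length : Int)) :
    pvRecvA repartition sel i (PySem.List.pyGetD (repartition.map dsel) i [])
    = pvRecvB (pvOwnersB repartition sel) i
        (dsel (PySem.List.pyGetD repartition i ([], [], [], []))) := by
  have hd : PySem.List.pyGetD (repartition.map dsel) i []
      = dsel (PySem.List.pyGetD repartition i ([], [], [], [])) := by
    rw [PySem.List.pyGetD_eq_getElem _ _ h0 (by simpa using h1), List.getElem_map,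
        PySem.List.pyGetD_eq_getElem _ _ h0 h1]
  rw [hd, pvRecvAB]

theorem mapsDesEchanges_ab (repartition : List (List Int × List Int × List Int × List Int)) :
    mapsDesEchanges repartition = mapsDesEchanges_alt repartition := by
  simp only [mapsDesEchanges, mapsDesEchanges_alt]
  have hrecv : ∀ (sel dsel : (List Int × List Int × List Int × List Int) → List Int),
      (PySem.List.pyRange 0 (repartition.length : Int) 1).map (fun i =>
        pvRecvA repartition sel i (PySem.List.pyGetD (repartition.map dsel) i []))
      = (PySem.List.pyRange 0 (repartition.length : Int) 1).map (fun i =>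
        pvRecvB (pvOwnersB repartition sel) i
          (dsel (PySem.List.pyGetD repartition i ([], [], [], [])))) := by
    intro sel dsel
    apply List.map_congr_left
    intro i hi
    rcases PySem.List.mem_pyRange_one.mp hi with ⟨h0, h1⟩
    exact pvRecvList_eq repartition sel dsel i h0 h1
  rw [hrecv (fun r => r.1) (fun r => r.2.1), hrecv (fun r => r.2.2.1) (fun r => r.2.2.2)]
  apply List.map_congr_left
  intro i hi
  rcases PySem.List.mem_pyRange_one.mp hi with ⟨h0, h1⟩
  have hrB : ∀ (sel dsel : (List Int × List Int × List Int × List Int) → List Int),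
      PySem.List.pyGetD ((PySem.List.pyRange 0 (repartition.length : Int) 1).map (fun j =>
        pvRecvB (pvOwnersB repartition sel) j
          (dsel (PySem.List.pyGetD repartition j ([], [], [], []))))) i PySem.Dict.empty
      = pvRecvB (pvOwnersB repartition sel) i
          (dsel (PySem.List.pyGetD repartition i ([], [], [], []))) :=
    fun sel dsel => PySem.List.pyGetD_map_pyRange_of_nonneg _ _ i _ h0 h1
  have hsend : ∀ (sel dsel : (List Int × List Int × List Int × List Int) → List Int),
      (pvSendA repartition.length i ((PySem.List.pyRange 0 (repartition.length : Int) 1).map (fun j =>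
        pvRecvB (pvOwnersB repartition sel) j
          (dsel (PySem.List.pyGetD repartition j ([], [], [], [])))))).items
      = (PySem.List.pyGetD (pvPassB repartition (pvOwnersB repartition sel) dsel).2 i
          PySem.Dict.empty).items := by
    intro sel dsel
    rw [pvSendA_items repartition.length i _
          (fun j => pvRecvB_keys_nodup _ _ _)
          (fun j k hk => pvRecvB_keys_ne _ _ _ k hk),
        pvPassB_snd_items repartition (pvOwnersB repartition sel) dsel i h0 h1]
  rw [pvPassB_fst, pvPassB_fst, hrB (fun r => r.1) (fun r => r.2.1),
      hrB (fun r => r.2.2.1) (fun r => r.2.2.2),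
      PySem.List.pyGetD_map_pyRange_of_nonneg _ _ i _ h0 h1,
      PySem.List.pyGetD_map_pyRange_of_nonneg _ _ i _ h0 h1,
      hsend (fun r => r.1) (fun r => r.2.1), hsend (fun r => r.2.2.1) (fun r => r.2.2.2)]

-- ===== VERDICT (by name: the statement is the Claim_ definition above) =====
theorem mapsDesEchanges_spec : Claim_equal_mapsDesEchanges := by
  intro repartition _
  unfold Spec_mapsDesEchanges
  exact mapsDesEchanges_ab repartition
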